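-- pv_equiv track=rewrite | github.com/Fioerd/PDFree | pdf_to_csv_tool.py | _check_column_consistency
-- ===== SOURCE A (Python) =====
-- from typing import Optional
--
-- def _check_column_consistency(rows: list) -> Optional[str]:
--     """
--     Return a warning string if the table has varying column counts,
--     or None if all rows are consistent.
--     """
--     if not rows:
--         return None
--     col_counts = [len(r) for r in rows]
--     unique_counts = set(col_counts)
--     if len(unique_counts) <= 1:
--         return None
--     min_c = min(unique_counts)
--     max_c = max(unique_counts)
--     return (f"Inconsistent column count: rows range from {min_c} to {max_c} columns. "
--             f"Some cells may be misaligned.")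
-- ===== SOURCE B (Python) =====
-- from typing import Optional
--
-- def _check_column_consistency(rows: list) -> Optional[str]:
--     """Single pass tracking running min/max column count; no counts list or set."""
--     if not rows:
--         return None
--     min_c = max_c = len(rows[0])
--     for r in rows[1:]:
--         n = len(r)
--         if n < min_c:
--             min_c = n
--         if n > max_c:
--             max_c = n
--     if min_c == max_c:
--         return None
--     return (f"Inconsistent column count: rows range from {min_c} to {max_c} columns. "
--             f"Some cells may be misaligned.")
-- ===== Notes on version B (the rewrite author's own statement) =====
-- stated objective: simpler
-- what changed: Replaces the counts list + set uniqueness check + min/max over the set with one pass that maintains a running min and max column count and compares them.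
import Mathlib
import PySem

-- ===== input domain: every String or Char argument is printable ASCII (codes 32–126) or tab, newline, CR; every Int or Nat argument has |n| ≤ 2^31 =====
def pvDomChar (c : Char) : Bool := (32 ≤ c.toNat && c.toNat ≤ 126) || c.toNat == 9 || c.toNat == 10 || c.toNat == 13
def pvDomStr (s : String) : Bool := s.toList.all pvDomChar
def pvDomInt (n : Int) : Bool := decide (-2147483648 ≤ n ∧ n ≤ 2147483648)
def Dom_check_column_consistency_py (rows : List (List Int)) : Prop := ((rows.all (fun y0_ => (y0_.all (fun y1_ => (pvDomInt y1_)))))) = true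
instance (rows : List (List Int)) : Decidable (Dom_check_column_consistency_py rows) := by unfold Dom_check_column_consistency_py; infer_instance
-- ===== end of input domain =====

-- B replaces A's counts list + set-uniqueness check + min/max over the set by one
-- running-min/running-max pass; same return value everywhere (objective: simpler).

-- ===== PORT A =====
def check_column_consistency_py (rows : List (List Int)) : Option String :=
  if rows = [] then none
  else
    let col_counts := rows.map (fun r => (r.length : Int))
    let unique_counts := PySem.Set.ofList col_counts
    if PySem.Set.len unique_counts ≤ 1 then none
    else
      let min_c := (PySem.List.min? unique_counts (fun x => x)).getD 0
      let max_c := (PySem.List.max? unique_counts (fun x => x)).getD 0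
      some ("Inconsistent column count: rows range from " ++ PySem.Int.toStr min_c
            ++ " to " ++ PySem.Int.toStr max_c ++ " columns. Some cells may be misaligned.")

-- ===== PORT B =====
def check_column_consistency_py_alt (rows : List (List Int)) : Option String :=
  match rows with
  | [] => none
  | r0 :: rest =>
    let p := rest.foldl
      (fun (p : Int × Int) r =>
        let n := (r.length : Int)
        ((if n < p.1 then n else p.1), (if n > p.2 then n else p.2)))
      ((r0.length : Int), (r0.length : Int))
    if p.1 = p.2 then none
    else
      some ("Inconsistent column count: rows range from " ++ PySem.Int.toStr p.1
            ++ " to " ++ PySem.Int.toStr p.2 ++ " columns. Some cells may be misaligned.")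

-- ===== PRECONDITION & SPEC =====
def Spec_check_column_consistency_py (rows : List (List Int)) (out : Option String) : Prop := out = check_column_consistency_py_alt rows
instance (rows : List (List Int)) (out : Option String) : Decidable (Spec_check_column_consistency_py rows out) := by unfold Spec_check_column_consistency_py; infer_instance

-- ===== CLAIM (what is proved, stated in full; the proofs are below) =====
def Claim_equal_check_column_consistency_py : Prop := ∀ (rows : List (List Int)), Dom_check_column_consistency_py rows → Spec_check_column_consistency_py rows (check_column_consistency_py rows)

-- ===== LEMMAS AND PROOFS =====

-- B's pair fold is the pair of running min and running max.
theorem pv_fold_pair (t : List Int) (a b : Int) :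
    t.foldl (fun (p : Int × Int) n =>
        ((if n < p.1 then n else p.1), (if n > p.2 then n else p.2))) (a, b)
      = (t.foldl min a, t.foldl max b) := by
  induction t generalizing a b with
  | nil => rfl
  | cons x t ih =>
    simp only [List.foldl_cons, ih]
    congr 1
    · rcases lt_or_ge x a with h | h
      · simp [h, le_of_lt h]
      · simp [h, not_lt.mpr h]
    · rcases lt_or_ge b x with h | h
      · simp [h, le_of_lt h]
      · simp [not_lt.mpr h, h]

theorem pv_fmin_mem (c : Int) (t : List Int) : t.foldl min c ∈ c :: t :=
  PySem.List.min?_mem (PySem.List.min?_id_cons (x := c) (t := t))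

theorem pv_fmin_le (c : Int) (t : List Int) : ∀ y ∈ c :: t, t.foldl min c ≤ y :=
  PySem.List.min?_isMin (PySem.List.min?_id_cons (x := c) (t := t))

theorem pv_fmax_mem (c : Int) (t : List Int) : t.foldl max c ∈ c :: t :=
  PySem.List.max?_mem (PySem.List.max?_id_cons (x := c) (t := t))

theorem pv_fmax_ge (c : Int) (t : List Int) : ∀ y ∈ c :: t, y ≤ t.foldl max c :=
  PySem.List.max?_isMax (PySem.List.max?_id_cons (x := c) (t := t))

-- a nodup list whose members all equal m has at most one element
theorem pv_nodup_const_len {l : List Int} {m : Int}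
    (hn : l.Nodup) (h : ∀ y ∈ l, y = m) : l.length ≤ 1 := by
  match l with
  | [] => simp
  | [x] => simp
  | x :: y :: t =>
    exfalso
    have hx := h x (by simp)
    have hy := h y (by simp)
    have : x ≠ y := by
      have := hn
      simp [List.nodup_cons] at this
      exact fun he => this.1.1 (he ▸ rfl)
    exact this (hx.trans hy.symm)

-- set-size-≤-1 test ↔ running min = running max
theorem pv_cond_iff (c : Int) (t : List Int) :
    ((PySem.Set.ofList (c :: t)).length ≤ 1) ↔ (t.foldl min c = t.foldl max c) := by
  constructor
  · intro hlen
    have hall : ∀ y ∈ c :: t, y = c := by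
      intro y hy
      have hyS : y ∈ PySem.Set.ofList (c :: t) := (PySem.Set.mem_ofList _ _).mpr hy
      have hcS : c ∈ PySem.Set.ofList (c :: t) := (PySem.Set.mem_ofList _ _).mpr (by simp)
      match hS : PySem.Set.ofList (c :: t) with
      | [] => rw [hS] at hyS; simp at hyS
      | [z] => rw [hS] at hyS hcS; simp at hyS hcS; rw [hyS, hcS]
      | z :: w :: r => rw [hS] at hlen; simp at hlen
    have h1 := hall _ (pv_fmin_mem c t)
    have h2 := hall _ (pv_fmax_mem c t)
    rw [h1, h2]
  · intro heq
    have hall : ∀ y ∈ PySem.Set.ofList (c :: t), y = t.foldl min c := by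
      intro y hy
      have hyL : y ∈ c :: t := (PySem.Set.mem_ofList _ _).mp hy
      have h1 := pv_fmin_le c t y hyL
      have h2 := pv_fmax_ge c t y hyL
      rw [← heq] at h2
      omega
    exact pv_nodup_const_len (PySem.Set.nodup_ofList _) hall

-- in the inconsistent case, min over the set = running min over the list
theorem pv_min_eq (c : Int) (t : List Int) :
    (PySem.List.min? (PySem.Set.ofList (c :: t)) (fun x => x)).getD 0 = t.foldl min c := by
  have hcS : c ∈ PySem.Set.ofList (c :: t) := (PySem.Set.mem_ofList _ _).mpr (by simp)
  match hS : PySem.Set.ofList (c :: t) with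
  | [] => rw [hS] at hcS; simp at hcS
  | z :: r =>
    rw [PySem.List.min?_id_cons, Option.getD_some]
    have hmemS : r.foldl min z ∈ z :: r := pv_fmin_mem z r
    have hmemL : r.foldl min z ∈ c :: t := by
      rw [← PySem.Set.mem_ofList (c :: t) _, hS]; exact hmemS
    have hminL_memS : t.foldl min c ∈ z :: r := by
      rw [← hS, PySem.Set.mem_ofList _ _]; exact pv_fmin_mem c t
    have h1 := pv_fmin_le c t _ hmemL
    have h2 := pv_fmin_le z r _ hminL_memS
    omega

theorem pv_max_eq (c : Int) (t : List Int) :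
    (PySem.List.max? (PySem.Set.ofList (c :: t)) (fun x => x)).getD 0 = t.foldl max c := by
  have hcS : c ∈ PySem.Set.ofList (c :: t) := (PySem.Set.mem_ofList _ _).mpr (by simp)
  match hS : PySem.Set.ofList (c :: t) with
  | [] => rw [hS] at hcS; simp at hcS
  | z :: r =>
    rw [PySem.List.max?_id_cons, Option.getD_some]
    have hmemL : r.foldl max z ∈ c :: t := by
      rw [← PySem.Set.mem_ofList (c :: t) _, hS]; exact pv_fmax_mem z r
    have hmaxL_memS : t.foldl max c ∈ z :: r := by
      rw [← hS, PySem.Set.mem_ofList _ _]; exact pv_fmax_mem c t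
    have h1 := pv_fmax_ge c t _ hmemL
    have h2 := pv_fmax_ge z r _ hmaxL_memS
    omega

-- ===== VERDICT (by name: the statement is the Claim_ definition above) =====
theorem check_column_consistency_py_spec : Claim_equal_check_column_consistency_py := by
  intro rows _
  unfold Spec_check_column_consistency_py check_column_consistency_py check_column_consistency_py_alt
  match rows with
  | [] => rfl
  | r0 :: rest =>
    simp only [reduceCtorEq, if_false, List.map_cons]
    set c : Int := (r0.length : Int) with hc
    set t : List Int := rest.map (fun r => (r.length : Int)) with ht
    have hfold := pv_fold_pair (rest.map (fun r => (r.length : Int))) c c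
    rw [List.foldl_map] at hfold
    simp only [hfold]
    have hlen : PySem.Set.len (PySem.Set.ofList (c :: t)) ≤ 1
        ↔ (PySem.Set.ofList (c :: t)).length ≤ 1 := by
      simp [PySem.Set.len]
    by_cases hcase : t.foldl min c = t.foldl max c
    · rw [if_pos (hlen.mpr ((pv_cond_iff c t).mpr hcase)), if_pos hcase]
    · rw [if_neg (fun h => hcase ((pv_cond_iff c t).mp (hlen.mp h))), if_neg hcase,
        pv_min_eq, pv_max_eq]
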